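-- pv_equiv track=rewrite | github.com/nga-27/intellistop | utils/zone_generator.py | generate_red_zones
-- ===== SOURCE A (Python) =====
-- from typing import List, Tuple
--
-- def generate_red_zones(green_zones: List[list], close: list) -> List[list]:
--     """generate_red_zones
--
--     Args:
--         green_zones (List[list]): assuming everything that has been derived by intellistops
--         close (list): list of closing prices
--
--     Returns:
--         List[list]: red_zones (list of red zone lists)
--     """
--     temp_concat = []
--     for array in green_zones:
--         temp_concat.extend(array)
--     red_zones = []
--     red_one = []
--     for i in range(len(close)):
--         if i not in temp_concat:
--             if len(red_one) == 0 and i != 0: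
--                 # First one that crosses is still in temp_concat, so we need to go backwards
--                 red_one.append(i-1)
--             red_one.append(i)
--         else:
--             if len(red_one) > 0:
--                 red_zones.append(red_one)
--                 red_one = []
--     if len(red_one) > 0:
--         red_zones.append(red_one)
--
--     return red_zones
-- ===== SOURCE B (Python) =====
-- from typing import List
--
-- def generate_red_zones(green_zones: List[list], close: list) -> List[list]:
--     green = set()
--     for z in green_zones:
--         green.update(z)
--     red_idx = [i for i in range(len(close)) if i not in green]
--     runs = []
--     k = 0
--     while k < len(red_idx):
--         run = [red_idx[k]]
--         k += 1
--         while k < len(red_idx) and red_idx[k] == run[-1] + 1: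
--             run.append(red_idx[k])
--             k += 1
--         runs.append(run)
--     return [[r[0] - 1] + r if r[0] > 0 else r for r in runs]
-- ===== Notes on version B (the rewrite author's own statement) =====
-- stated objective: faster
-- what changed: A scans every index with an O(|green|) list-membership test and a flush-on-green accumulator; B builds the green index set once, lists the red indices, groups them into maximal consecutive runs, and prepends start-1 to each run that does not begin at 0.
import Mathlib
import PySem

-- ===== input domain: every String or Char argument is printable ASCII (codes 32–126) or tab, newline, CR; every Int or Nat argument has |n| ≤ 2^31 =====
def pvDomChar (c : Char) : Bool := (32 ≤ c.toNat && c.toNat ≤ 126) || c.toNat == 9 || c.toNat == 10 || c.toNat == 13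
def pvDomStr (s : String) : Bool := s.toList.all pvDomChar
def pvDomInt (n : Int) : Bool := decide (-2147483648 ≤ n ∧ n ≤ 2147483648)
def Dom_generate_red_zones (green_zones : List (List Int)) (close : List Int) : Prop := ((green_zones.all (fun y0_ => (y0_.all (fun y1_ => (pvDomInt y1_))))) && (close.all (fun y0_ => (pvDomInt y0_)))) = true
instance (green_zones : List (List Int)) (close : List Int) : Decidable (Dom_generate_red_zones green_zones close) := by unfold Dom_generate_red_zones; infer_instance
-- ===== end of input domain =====

-- B replaces A's scan-and-flush accumulator (with list membership) by building the set of
-- green indices once, listing the red indices, and grouping them into maximal consecutive runs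
-- (objective: faster — set membership instead of a list scan per index).


-- ===== PORT A =====
def generate_red_zones (green_zones : List (List Int)) (close : List Int) : List (List Int) :=
  let temp_concat : List Int := green_zones.foldl (fun acc array => acc ++ array) []
  let st := (PySem.List.pyRange 0 (PySem.List.len close) 1).foldl
    (fun (st : List (List Int) × List Int) i =>
      if i ∉ temp_concat then
        let red_one := if st.2.length = 0 ∧ i ≠ 0 then st.2 ++ [i - 1] else st.2
        (st.1, red_one ++ [i])
      else
        if st.2.length > 0 then (st.1 ++ [st.2], ([] : List Int))
        else (st.1, st.2))
    ([], [])
  if st.2.length > 0 then st.1 ++ [st.2] else st.1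

-- ===== PORT B =====
-- inner while loop of B: take the maximal consecutive run continuing `prev`
def pvTakeRun : Int → List Int → List Int × List Int
  | _, [] => ([], [])
  | prev, x :: xs =>
    if x = prev + 1 then
      let p := pvTakeRun x xs
      (x :: p.1, p.2)
    else ([], x :: xs)

theorem pvTakeRun_rest_le (prev : Int) (l : List Int) : (pvTakeRun prev l).2.length ≤ l.length := by
  induction l generalizing prev with
  | nil => simp [pvTakeRun]
  | cons x xs ih =>
    simp only [pvTakeRun]
    split
    · exact le_trans (ih x) (Nat.le_succ _)
    · simp

-- outer while loop of B: split a list into maximal consecutive runs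
def pvRuns : List Int → List (List Int)
  | [] => []
  | x :: xs =>
    let p := pvTakeRun x xs
    (x :: p.1) :: pvRuns p.2
termination_by l => l.length
decreasing_by exact Nat.lt_succ_of_le (pvTakeRun_rest_le x xs)

def pvDec (r : List Int) : List Int :=
  match r with
  | [] => []
  | h :: t => if h > 0 then (h - 1) :: h :: t else h :: t

def generate_red_zones_alt (green_zones : List (List Int)) (close : List Int) : List (List Int) :=
  let green : PySem.Set Int := green_zones.foldl (fun s z => PySem.Set.update s z) PySem.Set.empty
  let red_idx := (PySem.List.pyRange 0 (PySem.List.len close) 1).filter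
    (fun i => !(PySem.Set.contains green i))
  (pvRuns red_idx).map pvDec

-- ===== PRECONDITION & SPEC =====
def Spec_generate_red_zones (green_zones : List (List Int)) (close : List Int) (out : List (List Int)) : Prop := out = generate_red_zones_alt green_zones close
instance (green_zones : List (List Int)) (close : List Int) (out : List (List Int)) : Decidable (Spec_generate_red_zones green_zones close out) := by unfold Spec_generate_red_zones; infer_instance

-- ===== CLAIM (what is proved, stated in full; the proofs are below) =====
def Claim_equal_generate_red_zones : Prop := ∀ (green_zones : List (List Int)) (close : List Int), Dom_generate_red_zones green_zones close → Spec_generate_red_zones green_zones close (generate_red_zones green_zones close)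

-- ===== LEMMAS AND PROOFS =====

-- A's loop body and finalizer, with the concatenated green list g abstracted out
def pvStep (g : List Int) (st : List (List Int) × List Int) (i : Int) : List (List Int) × List Int :=
  if i ∉ g then
    let red_one := if st.2.length = 0 ∧ i ≠ 0 then st.2 ++ [i - 1] else st.2
    (st.1, red_one ++ [i])
  else
    if st.2.length > 0 then (st.1 ++ [st.2], ([] : List Int))
    else (st.1, st.2)

def pvFin (st : List (List Int) × List Int) : List (List Int) :=
  if st.2.length > 0 then st.1 ++ [st.2] else st.1

-- the red indices in [a, n)
def pvRed (g : List Int) (a n : Int) : List Int :=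
  (PySem.List.pyRange a n 1).filter (fun i => !(decide (i ∈ g)))

theorem pvRed_all_ge (g : List Int) (a n : Int) : ∀ x ∈ pvRed g a n, a ≤ x := by
  intro x hx
  have := (List.mem_filter.mp hx).1
  exact (PySem.List.mem_pyRange_one.mp this).1

theorem pvTakeRun_of_ge (prev : Int) (l : List Int) (h : ∀ x ∈ l, prev + 1 < x) :
    pvTakeRun prev l = ([], l) := by
  cases l with
  | nil => rfl
  | cons x xs =>
    have hx := h x (by simp)
    have hne : ¬ x = prev + 1 := by omega
    simp [pvTakeRun, hne]

theorem pvBase (g : List Int) (n a : Int) (h : n ≤ a) :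
    (∀ z : List (List Int),
      pvFin ((PySem.List.pyRange a n 1).foldl (pvStep g) (z, [])) =
        z ++ (pvRuns (pvRed g a n)).map pvDec)
    ∧ (∀ (z : List (List Int)) (c : List Int), c ≠ [] →
      pvFin ((PySem.List.pyRange a n 1).foldl (pvStep g) (z, c)) =
        z ++ ((c ++ (pvTakeRun (a - 1) (pvRed g a n)).1) ::
          (pvRuns (pvTakeRun (a - 1) (pvRed g a n)).2).map pvDec)) := by
  have hnil : PySem.List.pyRange a n 1 = [] := PySem.List.pyRange_one_eq_nil h
  have hrednil : pvRed g a n = [] := by simp [pvRed, hnil]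
  constructor
  · intro z
    simp [hnil, hrednil, pvFin, pvRuns]
  · intro z c hc
    have hlen : 0 < c.length := List.length_pos_iff.mpr hc
    simp [hnil, hrednil, pvFin, pvTakeRun, pvRuns, hlen]

theorem pvMain (g : List Int) (n : Int) : ∀ (k : Nat) (a : Int), 0 ≤ a → n ≤ a + k →
    (∀ z : List (List Int),
      pvFin ((PySem.List.pyRange a n 1).foldl (pvStep g) (z, [])) =
        z ++ (pvRuns (pvRed g a n)).map pvDec)
    ∧ (∀ (z : List (List Int)) (c : List Int), c ≠ [] →
      pvFin ((PySem.List.pyRange a n 1).foldl (pvStep g) (z, c)) =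
        z ++ ((c ++ (pvTakeRun (a - 1) (pvRed g a n)).1) ::
          (pvRuns (pvTakeRun (a - 1) (pvRed g a n)).2).map pvDec)) := by
  intro k
  induction k with
  | zero =>
    intro a _ hk
    exact pvBase g n a (by omega)
  | succ k ih =>
    intro a ha hk
    by_cases hn : n ≤ a
    · exact pvBase g n a hn
    · rw [not_le] at hn
      have hcons : PySem.List.pyRange a n 1 = a :: PySem.List.pyRange (a + 1) n 1 :=
        PySem.List.pyRange_one_cons hn
      obtain ⟨ih1, ih2⟩ := ih (a + 1) (by omega) (by omega)
      have hsub : a + 1 - 1 = a := by ring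
      rw [hsub] at ih2
      by_cases hg : a ∈ g
      · -- green index: flush (or no-op) then continue
        have hred : pvRed g a n = pvRed g (a + 1) n := by
          simp [pvRed, hcons, hg]
        have hTR : pvTakeRun (a - 1) (pvRed g (a + 1) n) = ([], pvRed g (a + 1) n) := by
          apply pvTakeRun_of_ge
          intro x hx
          have := pvRed_all_ge g (a + 1) n x hx
          omega
        constructor
        · intro z
          have hstep : pvStep g (z, ([] : List Int)) a = (z, []) := by simp [pvStep, hg]
          rw [hcons, List.foldl_cons, hstep, ih1 z, hred]
        · intro z c hc
          have hlen : 0 < c.length := List.length_pos_iff.mpr hc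
          have hstep : pvStep g (z, c) a = (z ++ [c], []) := by simp [pvStep, hg, hlen]
          rw [hcons, List.foldl_cons, hstep, ih1 (z ++ [c]), hred, hTR]
          simp
      · -- red index: run starts or continues
        have hred : pvRed g a n = a :: pvRed g (a + 1) n := by
          simp [pvRed, hcons, hg]
        have hruns : pvRuns (a :: pvRed g (a + 1) n) =
            (a :: (pvTakeRun a (pvRed g (a + 1) n)).1) ::
              pvRuns (pvTakeRun a (pvRed g (a + 1) n)).2 := by
          simp [pvRuns]
        constructor
        · intro z
          by_cases ha0 : a = 0
          · subst ha0
            have hstep : pvStep g (z, ([] : List Int)) 0 = (z, [0]) := by simp [pvStep, hg]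
            rw [hcons, List.foldl_cons, hstep, ih2 z [0] (by simp), hred, hruns]
            simp [pvDec]
          · have hstep : pvStep g (z, ([] : List Int)) a = (z, [a - 1, a]) := by
              simp [pvStep, hg, ha0]
            rw [hcons, List.foldl_cons, hstep, ih2 z [a - 1, a] (by simp), hred, hruns]
            have hpos : a > 0 := by omega
            simp [pvDec, hpos]
        · intro z c hc
          have hlen : ¬ c.length = 0 := by
            simpa [List.length_eq_zero_iff] using hc
          have hstep : pvStep g (z, c) a = (z, c ++ [a]) := by simp [pvStep, hg, hlen]
          rw [hcons, List.foldl_cons, hstep, ih2 z (c ++ [a]) (by simp), hred]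
          have hTR : pvTakeRun (a - 1) (a :: pvRed g (a + 1) n) =
              (a :: (pvTakeRun a (pvRed g (a + 1) n)).1,
                (pvTakeRun a (pvRed g (a + 1) n)).2) := by
            simp only [pvTakeRun]
            rw [if_pos (show a = a - 1 + 1 by ring)]
          rw [hTR]
          simp

theorem pvFoldlAppend (l : List (List Int)) :
    ∀ init : List Int, l.foldl (fun acc a => acc ++ a) init = init ++ l.flatten := by
  induction l with
  | nil => simp
  | cons x xs ih => intro init; simp [List.foldl_cons, ih, List.append_assoc]

theorem pvMemFoldlUpdate (l : List (List Int)) : ∀ (s : PySem.Set Int) (y : Int),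
    y ∈ l.foldl (fun s z => PySem.Set.update s z) s ↔ y ∈ s ∨ ∃ z ∈ l, y ∈ z := by
  induction l with
  | nil => simp
  | cons x xs ih =>
    intro s y
    simp [List.foldl_cons, ih, PySem.Set.mem_update]
    tauto

-- ===== VERDICT (by name: the statement is the Claim_ definition above) =====
theorem generate_red_zones_spec : Claim_equal_generate_red_zones := by
  intro green_zones close _
  unfold Spec_generate_red_zones
  have hmem : ∀ i : Int,
      (PySem.Set.contains
        (green_zones.foldl (fun s z => PySem.Set.update s z) PySem.Set.empty) i) =
      (decide (i ∈ green_zones.foldl (fun acc array => acc ++ array) [])) := by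
    intro i
    have h1 : (i ∈ green_zones.foldl (fun s z => PySem.Set.update s z) PySem.Set.empty) ↔
        (i ∈ green_zones.foldl (fun acc array => acc ++ array) []) := by
      rw [pvMemFoldlUpdate, pvFoldlAppend]
      simp [PySem.Set.empty, List.mem_flatten]
    rw [Bool.eq_iff_iff, PySem.Set.contains_iff, decide_eq_true_eq]
    exact h1
  have hA : generate_red_zones green_zones close =
      pvFin ((PySem.List.pyRange 0 (PySem.List.len close) 1).foldl
        (pvStep (green_zones.foldl (fun acc array => acc ++ array) [])) ([], [])) := rfl
  have hB : generate_red_zones_alt green_zones close =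
      (pvRuns ((PySem.List.pyRange 0 (PySem.List.len close) 1).filter
        (fun i => !(PySem.Set.contains
          (green_zones.foldl (fun s z => PySem.Set.update s z) PySem.Set.empty) i)))).map
        pvDec := rfl
  rw [hA, hB]
  have hfilter : (fun i => !(PySem.Set.contains
      (green_zones.foldl (fun s z => PySem.Set.update s z) PySem.Set.empty) i)) =
      (fun i : Int =>
        !(decide (i ∈ green_zones.foldl (fun acc array => acc ++ array) []))) := by
    funext i; rw [hmem i]
  rw [hfilter]
  obtain ⟨h1, _⟩ := pvMain (green_zones.foldl (fun acc array => acc ++ array) [])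
    (PySem.List.len close) close.length 0 le_rfl (by simp [PySem.List.len_eq])
  simpa [pvRed] using h1 []
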